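-- pv_equiv track=rewrite | github.com/phildsnutz/Xiphos-Vetting | backend/osint/google_news.py | _title_relevance
-- ===== SOURCE A (Python) =====
-- def _title_relevance(title: str, vendor_names: list[str]) -> int:
--     lowered = str(title or "").casefold()
--     best = 0
--     for vendor_name in vendor_names:
--         candidate = vendor_name.casefold()
--         if candidate and candidate in lowered:
--             best = max(best, len(candidate))
--     return best
-- ===== SOURCE B (Python) =====
-- def _title_relevance(title: str, vendor_names: list[str]) -> int:
--     lowered = str(title or "").casefold()
--     candidates = sorted((v.casefold() for v in vendor_names if v), key=len, reverse=True)
--     for candidate in candidates: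
--         if candidate in lowered:
--             return len(candidate)
--     return 0
-- ===== Notes on version B (the rewrite author's own statement) =====
-- stated objective: faster
-- what changed: A scans every vendor, running a substring test on each while tracking a running max; B sorts the nonempty casefolded names by length descending and returns the length of the first one that is a substring of the title, short-circuiting so most substring tests are skipped.
import Mathlib
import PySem

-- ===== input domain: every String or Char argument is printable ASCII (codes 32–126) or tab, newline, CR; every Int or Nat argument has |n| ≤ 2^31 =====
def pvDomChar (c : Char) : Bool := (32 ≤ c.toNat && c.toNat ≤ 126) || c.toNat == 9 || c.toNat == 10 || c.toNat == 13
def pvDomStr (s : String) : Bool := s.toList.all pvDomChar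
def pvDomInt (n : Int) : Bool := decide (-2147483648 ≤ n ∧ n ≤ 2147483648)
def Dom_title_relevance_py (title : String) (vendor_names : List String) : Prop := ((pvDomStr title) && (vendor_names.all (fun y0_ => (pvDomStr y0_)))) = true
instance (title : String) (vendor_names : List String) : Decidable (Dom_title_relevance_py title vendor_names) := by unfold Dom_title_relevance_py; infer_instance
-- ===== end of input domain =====

-- B replaces A's running-max scan over all vendors by: sort the nonempty casefolded
-- names by length descending, then return the length of the first substring match.
-- casefold is ported as PySem.Str.lower (exact on the ASCII domain above).

-- ===== PORT A =====
def title_relevance_py (title : String) (vendor_names : List String) : Int :=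
  let lowered := PySem.Str.lower (if title == "" then "" else title)  -- str(title or "").casefold()
  vendor_names.foldl
    (fun best vendor_name =>
      let candidate := PySem.Str.lower vendor_name
      if (!(candidate == "")) && PySem.Str.isIn candidate lowered then
        max best (PySem.Str.len candidate)
      else best) 0

-- ===== PORT B =====
-- length of the first candidate (in order) that is a substring of lowered, else 0
def pvFirstMatchLen (lowered : String) : List String → Int
  | [] => 0
  | c :: rest => if PySem.Str.isIn c lowered then PySem.Str.len c else pvFirstMatchLen lowered rest

def title_relevance_py_alt (title : String) (vendor_names : List String) : Int :=
  let lowered := PySem.Str.lower (if title == "" then "" else title)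
  let candidates :=
    PySem.List.sorted ((vendor_names.filter (fun v => !(v == ""))).map PySem.Str.lower)
      (fun c => PySem.Str.len c) true
  pvFirstMatchLen lowered candidates

-- ===== PRECONDITION & SPEC =====
def Spec_title_relevance_py (title : String) (vendor_names : List String) (out : Int) : Prop := out = title_relevance_py_alt title vendor_names
instance (title : String) (vendor_names : List String) (out : Int) : Decidable (Spec_title_relevance_py title vendor_names out) := by unfold Spec_title_relevance_py; infer_instance

-- ===== CLAIM (what is proved, stated in full; the proofs are below) =====
def Claim_equal_title_relevance_py : Prop := ∀ (title : String) (vendor_names : List String), Dom_title_relevance_py title vendor_names → Spec_title_relevance_py title vendor_names (title_relevance_py title vendor_names)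

-- ===== LEMMAS AND PROOFS =====

-- A's fold is a running max over the lengths of the matching candidates
theorem pvA_fold_eq_foldl_max (lw : String) (l : List String) (acc : Int) :
    l.foldl (fun best v =>
        if (!(PySem.Str.lower v == "")) && PySem.Str.isIn (PySem.Str.lower v) lw
        then max best (PySem.Str.len (PySem.Str.lower v)) else best) acc
    = ((l.filter (fun v => (!(PySem.Str.lower v == "")) && PySem.Str.isIn (PySem.Str.lower v) lw)).map
        (fun v => PySem.Str.len (PySem.Str.lower v))).foldl max acc := by
  induction l generalizing acc with
  | nil => rfl
  | cons v t ih =>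
    simp only [List.foldl_cons, List.filter_cons]
    cases h : (!(PySem.Str.lower v == "")) && PySem.Str.isIn (PySem.Str.lower v) lw with
    | true => rw [if_pos rfl, if_pos rfl, List.map_cons, List.foldl_cons, ih]
    | false => rw [if_neg (by simp), if_neg (by simp), ih]

theorem pvFoldl_max_of_le (l : List Int) (acc : Int) (h : ∀ x ∈ l, x ≤ acc) :
    l.foldl max acc = acc := by
  induction l generalizing acc with
  | nil => rfl
  | cons x t ih =>
    simp only [List.foldl_cons]
    rw [max_eq_left (h x (by simp))]
    exact ih acc (fun y hy => h y (by simp [hy]))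

theorem pvStrLen_nonneg (s : String) : 0 ≤ PySem.Str.len s := by
  simp [PySem.Str.len_eq]

-- on a length-descending list, the first match's length is the max of all match lengths
theorem pvFirstMatchLen_eq_max (lw : String) (cs : List String)
    (hp : cs.Pairwise (fun a b => PySem.Str.len b ≤ PySem.Str.len a)) :
    pvFirstMatchLen lw cs
      = ((cs.filter (fun c => PySem.Str.isIn c lw)).map (fun c => PySem.Str.len c)).foldl max 0 := by
  induction cs with
  | nil => rfl
  | cons c t ih =>
    rcases List.pairwise_cons.mp hp with ⟨hc, ht⟩
    simp only [pvFirstMatchLen, List.filter_cons]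
    cases h : PySem.Str.isIn c lw with
    | true =>
      rw [if_pos rfl, if_pos rfl, List.map_cons, List.foldl_cons,
        max_eq_right (pvStrLen_nonneg c)]
      symm
      apply pvFoldl_max_of_le
      intro x hx
      simp only [List.mem_map, List.mem_filter] at hx
      rcases hx with ⟨y, ⟨hy, _⟩, rfl⟩
      exact hc y hy
    | false => rw [if_neg (by simp), if_neg (by simp), ih ht]

-- foldl max is permutation-invariant
theorem pvFoldl_max_perm (l l' : List Int) (h : l.Perm l') (acc : Int) :
    l.foldl max acc = l'.foldl max acc :=
  h.foldl_eq' (fun x _ y _ z => by rw [max_right_comm]) acc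

theorem pvLower_eq_empty_iff (v : String) : (PySem.Str.lower v == "") = (v == "") := by
  rcases eq_or_ne v "" with h | h
  · subst h; rfl
  · have hl : PySem.Str.lower v ≠ "" := by
      simp [← String.toList_eq_nil_iff, PySem.Chars.lower] at *; exact h
    simp [hl, h]

-- the whole equivalence, for a fixed lowered title
theorem pvMain (lw : String) (l : List String) :
    l.foldl (fun best v =>
        if (!(PySem.Str.lower v == "")) && PySem.Str.isIn (PySem.Str.lower v) lw
        then max best (PySem.Str.len (PySem.Str.lower v)) else best) 0
    = pvFirstMatchLen lw
        (PySem.List.sorted ((l.filter (fun v => !(v == ""))).map PySem.Str.lower)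
          (fun c => PySem.Str.len c) true) := by
  rw [pvA_fold_eq_foldl_max,
    pvFirstMatchLen_eq_max lw _ (PySem.List.sorted_pairwise_rev _ _)]
  have hperm := PySem.List.sorted_perm
    ((l.filter (fun v => !(v == ""))).map PySem.Str.lower) (fun c => PySem.Str.len c) true
  have h2 := (hperm.filter (fun c => PySem.Str.isIn c lw)).map (fun c => PySem.Str.len c)
  have h3 : (((l.filter (fun v => !(v == ""))).map PySem.Str.lower).filter
        (fun c => PySem.Str.isIn c lw)).map (fun c => PySem.Str.len c)
      = (l.filter (fun v => (!(PySem.Str.lower v == "")) && PySem.Str.isIn (PySem.Str.lower v) lw)).map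
        (fun v => PySem.Str.len (PySem.Str.lower v)) := by
    rw [List.filter_map, List.map_map]
    rw [List.filter_filter]
    congr 1
    apply List.filter_congr
    intro v _
    simp only [Function.comp, pvLower_eq_empty_iff v, Bool.and_comm]
  exact (pvFoldl_max_perm _ _ (h3 ▸ h2) 0).symm

-- ===== VERDICT (by name: the statement is the Claim_ definition above) =====
theorem title_relevance_py_spec : Claim_equal_title_relevance_py := by
  intro title vendor_names _
  show title_relevance_py title vendor_names = title_relevance_py_alt title vendor_names
  exact pvMain (PySem.Str.lower (if title == "" then "" else title)) vendor_names
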